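-- pv_equiv track=rewrite | github.com/Wunyje/byd_rev | can_4_16/2_reverse/entropy/normal_fuzzy.py | apply_fuzzed_data
-- ===== SOURCE A (Python) =====
-- def apply_fuzzed_data(initial_data, fuzzed_nibbles, bitmap):
--     fuzz_index = 0
--     result_bytes = []
--     for i in range(0, len(bitmap), 2):
--         # Apply fuzzed nibbles on top of initial data
--         if bitmap[i]:
--             high_nibble = fuzzed_nibbles[fuzz_index]
--             fuzz_index += 1
--         else:
--             high_nibble = initial_data[i]
--
--         if bitmap[i+1]:
--             low_nibble = fuzzed_nibbles[fuzz_index]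
--             fuzz_index += 1
--         else:
--             low_nibble = initial_data[i + 1]
--         current_byte = (high_nibble << 4) + low_nibble
--         result_bytes.append(current_byte)
--     return result_bytes
-- ===== SOURCE B (Python) =====
-- def apply_fuzzed_data(initial_data, fuzzed_nibbles, bitmap):
--     # Pass 1: resolve every nibble position from either the fuzz stream or the initial data.
--     nibbles = []
--     fi = 0
--     for i in range(len(bitmap)):
--         if bitmap[i]:
--             nibbles.append(fuzzed_nibbles[fi])
--             fi += 1
--         else:
--             nibbles.append(initial_data[i])
--     # Pass 2: pack consecutive nibble pairs into bytes.
--     return [(nibbles[i] << 4) + nibbles[i + 1] for i in range(0, len(bitmap), 2)]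
-- ===== Notes on version B (the rewrite author's own statement) =====
-- stated objective: alternative
-- what changed: Replaces the single paired loop (two bitmap tests and a byte append per iteration) by two flat passes: first resolve the full nibble list position by position, then pack consecutive nibble pairs into bytes with a comprehension.
import Mathlib
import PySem

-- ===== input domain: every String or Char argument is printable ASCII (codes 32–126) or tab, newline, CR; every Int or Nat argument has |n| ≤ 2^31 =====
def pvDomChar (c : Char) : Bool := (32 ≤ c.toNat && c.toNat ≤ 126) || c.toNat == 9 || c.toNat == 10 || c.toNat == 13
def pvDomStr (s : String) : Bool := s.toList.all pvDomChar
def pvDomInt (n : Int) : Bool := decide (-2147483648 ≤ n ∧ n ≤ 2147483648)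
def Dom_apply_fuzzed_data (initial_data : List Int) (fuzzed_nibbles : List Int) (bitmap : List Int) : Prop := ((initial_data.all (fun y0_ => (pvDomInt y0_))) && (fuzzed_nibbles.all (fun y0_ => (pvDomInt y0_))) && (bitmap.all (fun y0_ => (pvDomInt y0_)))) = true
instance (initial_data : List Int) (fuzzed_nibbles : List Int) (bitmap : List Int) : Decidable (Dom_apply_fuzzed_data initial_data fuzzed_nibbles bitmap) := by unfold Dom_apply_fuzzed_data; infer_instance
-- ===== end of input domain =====

-- B resolves all nibbles in one flat pass, then packs pairs in a second pass (alternative decomposition, same cost).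


-- ===== PORT A =====
-- Literal port of A: one loop over range(0, len(bitmap), 2); state = (fuzz_index, result_bytes).
def apply_fuzzed_data (initial_data : List Int) (fuzzed_nibbles : List Int) (bitmap : List Int) : List Int :=
  ((PySem.List.pyRange 0 (bitmap.length : Int) 2).foldl
    (fun (st : Int × List Int) i =>
      let hi : Int × Int :=
        if PySem.List.pyGetD bitmap i 0 ≠ 0
        then (PySem.List.pyGetD fuzzed_nibbles st.1 0, st.1 + 1)
        else (PySem.List.pyGetD initial_data i 0, st.1)
      let lo : Int × Int :=
        if PySem.List.pyGetD bitmap (i + 1) 0 ≠ 0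
        then (PySem.List.pyGetD fuzzed_nibbles hi.2 0, hi.2 + 1)
        else (PySem.List.pyGetD initial_data (i + 1) 0, hi.2)
      (lo.2, st.2 ++ [hi.1 <<< (4 : Nat) + lo.1]))
    ((0 : Int), ([] : List Int))).2

-- ===== PORT B =====
-- Literal port of B: pass 1 builds the nibble list (state = (fi, nibbles)), pass 2 packs pairs.
def apply_fuzzed_data_alt (initial_data : List Int) (fuzzed_nibbles : List Int) (bitmap : List Int) : List Int :=
  let nibbles : List Int :=
    ((PySem.List.pyRange 0 (bitmap.length : Int) 1).foldl
      (fun (st : Int × List Int) i =>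
        if PySem.List.pyGetD bitmap i 0 ≠ 0
        then (st.1 + 1, st.2 ++ [PySem.List.pyGetD fuzzed_nibbles st.1 0])
        else (st.1, st.2 ++ [PySem.List.pyGetD initial_data i 0]))
      ((0 : Int), ([] : List Int))).2
  (PySem.List.pyRange 0 (bitmap.length : Int) 2).map
    (fun i => PySem.List.pyGetD nibbles i 0 <<< (4 : Nat) + PySem.List.pyGetD nibbles (i + 1) 0)

-- ===== PRECONDITION & SPEC =====
-- Pre_ excludes exactly the inputs on which Python A raises IndexError: an odd-length bitmap
-- (bitmap[i+1] out of range), more truthy bitmap entries than fuzzed nibbles, or a falsy bitmap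
-- position with no corresponding initial_data entry.
def Pre_apply_fuzzed_data (initial_data : List Int) (fuzzed_nibbles : List Int) (bitmap : List Int) : Prop :=
  bitmap.length % 2 = 0 ∧
  bitmap.countP (fun b => decide (b ≠ 0)) ≤ fuzzed_nibbles.length ∧
  ∀ p ∈ bitmap.zipIdx, p.1 = 0 → p.2 < initial_data.length
instance (initial_data : List Int) (fuzzed_nibbles : List Int) (bitmap : List Int) : Decidable (Pre_apply_fuzzed_data initial_data fuzzed_nibbles bitmap) := by unfold Pre_apply_fuzzed_data; infer_instance
def pvWitness_apply_fuzzed_data : List Int × List Int × List Int := ([1, 2], [5], [1, 0])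

def Spec_apply_fuzzed_data (initial_data : List Int) (fuzzed_nibbles : List Int) (bitmap : List Int) (out : List Int) : Prop := out = apply_fuzzed_data_alt initial_data fuzzed_nibbles bitmap
instance (initial_data : List Int) (fuzzed_nibbles : List Int) (bitmap : List Int) (out : List Int) : Decidable (Spec_apply_fuzzed_data initial_data fuzzed_nibbles bitmap out) := by unfold Spec_apply_fuzzed_data; infer_instance

-- ===== CLAIM (what is proved, stated in full; the proofs are below) =====
def Claim_equal_apply_fuzzed_data : Prop := ∀ (initial_data : List Int) (fuzzed_nibbles : List Int) (bitmap : List Int), Dom_apply_fuzzed_data initial_data fuzzed_nibbles bitmap → Pre_apply_fuzzed_data initial_data fuzzed_nibbles bitmap → Spec_apply_fuzzed_data initial_data fuzzed_nibbles bitmap (apply_fuzzed_data initial_data fuzzed_nibbles bitmap)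

-- ===== LEMMAS AND PROOFS =====

-- Number of truthy bitmap entries strictly before position m (= the fuzz index when the loop reaches m).
def fzCount (bitmap : List Int) (m : Nat) : Nat :=
  (bitmap.take m).countP (fun b => decide (b ≠ 0))

-- The nibble placed at position i by either program.
def nib (initial_data fuzzed_nibbles bitmap : List Int) (i : Nat) : Int :=
  if bitmap.getD i 0 ≠ 0 then fuzzed_nibbles.getD (fzCount bitmap i) 0 else initial_data.getD i 0

theorem fzCount_succ (bitmap : List Int) (m : Nat) :
    fzCount bitmap (m + 1) = fzCount bitmap m + (if bitmap.getD m 0 ≠ 0 then 1 else 0) := by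
  unfold fzCount
  rw [List.take_add_one, List.countP_append]
  by_cases h : m < bitmap.length
  · rw [List.getElem?_eq_getElem h, List.getD_eq_getElem _ _ h]
    simp
  · have h1 : bitmap.length ≤ m := by omega
    rw [List.getElem?_eq_none h1, List.getD_eq_default _ _ h1]
    simp

theorem pyRange_two (k : Nat) :
    PySem.List.pyRange 0 ((2 * k : Nat) : Int) 2 = (List.range k).map (fun j => ((2 * j : Nat) : Int)) := by
  rw [PySem.List.pyRange_of_pos 0 _ (by norm_num)]
  have hc : (if (0 : Int) < ((2 * k : Nat) : Int) then ((((2 * k : Nat) : Int) - 0 + 2 - 1) / 2).toNat else 0) = k := by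
    split_ifs with h <;> push_cast at h ⊢ <;> omega
  rw [hc]
  apply List.map_congr_left
  intro j _
  push_cast
  ring

-- Pass 1 of B: state after m iterations.
theorem nibLoop (initial_data fuzzed_nibbles bitmap : List Int) (m : Nat) :
    (PySem.List.pyRange 0 (m : Nat) 1).foldl
      (fun (st : Int × List Int) i =>
        if PySem.List.pyGetD bitmap i 0 ≠ 0
        then (st.1 + 1, st.2 ++ [PySem.List.pyGetD fuzzed_nibbles st.1 0])
        else (st.1, st.2 ++ [PySem.List.pyGetD initial_data i 0]))
      ((0 : Int), ([] : List Int))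
    = ((fzCount bitmap m : Int), (List.range m).map (nib initial_data fuzzed_nibbles bitmap)) := by
  induction m with
  | zero => rfl
  | succ m ih =>
    have hr : PySem.List.pyRange 0 ((m + 1 : Nat) : Int) 1 = PySem.List.pyRange 0 (m : Nat) 1 ++ [(m : Int)] := by
      push_cast
      exact PySem.List.pyRange_one_succ_right (by positivity)
    rw [hr, List.foldl_append, ih, List.range_succ, List.map_append, fzCount_succ]
    simp only [List.foldl_cons, List.foldl_nil]
    by_cases h : bitmap[m]?.getD 0 = 0
    · simp [PySem.List.pyGetD_natCast, nib, h]
    · simp [PySem.List.pyGetD_natCast, nib, h]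

-- The loop of A: state after k pair-iterations.
theorem byteLoop (initial_data fuzzed_nibbles bitmap : List Int) (k : Nat) :
    (PySem.List.pyRange 0 ((2 * k : Nat) : Int) 2).foldl
      (fun (st : Int × List Int) i =>
        let hi : Int × Int :=
          if PySem.List.pyGetD bitmap i 0 ≠ 0
          then (PySem.List.pyGetD fuzzed_nibbles st.1 0, st.1 + 1)
          else (PySem.List.pyGetD initial_data i 0, st.1)
        let lo : Int × Int :=
          if PySem.List.pyGetD bitmap (i + 1) 0 ≠ 0
          then (PySem.List.pyGetD fuzzed_nibbles hi.2 0, hi.2 + 1)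
          else (PySem.List.pyGetD initial_data (i + 1) 0, hi.2)
        (lo.2, st.2 ++ [hi.1 <<< (4 : Nat) + lo.1]))
      ((0 : Int), ([] : List Int))
    = ((fzCount bitmap (2 * k) : Int),
       (List.range k).map (fun j =>
         nib initial_data fuzzed_nibbles bitmap (2 * j) <<< (4 : Nat)
           + nib initial_data fuzzed_nibbles bitmap (2 * j + 1))) := by
  induction k with
  | zero => rfl
  | succ k ih =>
    have hsplit : PySem.List.pyRange 0 ((2 * (k + 1) : Nat) : Int) 2
        = PySem.List.pyRange 0 ((2 * k : Nat) : Int) 2 ++ [((2 * k : Nat) : Int)] := by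
      rw [pyRange_two, pyRange_two, List.range_succ, List.map_append]
      simp
    have e1 : 2 * (k + 1) = (2 * k + 1) + 1 := by ring
    rw [hsplit, List.foldl_append, ih, List.range_succ, List.map_append, e1,
      fzCount_succ, fzCount_succ]
    simp only [List.foldl_cons, List.foldl_nil]
    have hc1 : ((fzCount bitmap (2 * k) : Int)) + 1 = ((fzCount bitmap (2 * k) + 1 : Nat) : Int) := by
      push_cast; ring
    have hcast : ((2 * k : Nat) : Int) + 1 = ((2 * k + 1 : Nat) : Int) := by push_cast; ring
    have hfz : PySem.List.pyGetD fuzzed_nibbles ((fzCount bitmap (2 * k) : Int) + 1) 0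
        = fuzzed_nibbles.getD (fzCount bitmap (2 * k) + 1) 0 := by
      rw [hc1, PySem.List.pyGetD_natCast]
    have hf0 : PySem.List.pyGetD fuzzed_nibbles ((fzCount bitmap (2 * k) : Nat) : Int) 0
        = fuzzed_nibbles.getD (fzCount bitmap (2 * k)) 0 := PySem.List.pyGetD_natCast _ _ _
    have hb1 : PySem.List.pyGetD bitmap ((2 * k : Nat) : Int) 0 = bitmap.getD (2 * k) 0 :=
      PySem.List.pyGetD_natCast _ _ _
    have hb2 : PySem.List.pyGetD bitmap (((2 * k : Nat) : Int) + 1) 0 = bitmap.getD (2 * k + 1) 0 := by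
      rw [hcast, PySem.List.pyGetD_natCast]
    have hi1 : PySem.List.pyGetD initial_data ((2 * k : Nat) : Int) 0 = initial_data.getD (2 * k) 0 :=
      PySem.List.pyGetD_natCast _ _ _
    have hi2 : PySem.List.pyGetD initial_data (((2 * k : Nat) : Int) + 1) 0 = initial_data.getD (2 * k + 1) 0 := by
      rw [hcast, PySem.List.pyGetD_natCast]
    by_cases h1 : bitmap[2 * k]?.getD 0 = 0 <;> by_cases h2 : bitmap[2 * k + 1]?.getD 0 = 0 <;>
      simp only [hb1, hb2, hi1, hi2, hf0] <;>
      simp [nib, fzCount_succ, h1, h2, hf0, hfz]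

theorem getD_map_range_nib (f : Nat → Int) (n j : Nat) (h : j < n) :
    ((List.range n).map f).getD j 0 = f j := by
  rw [List.getD_eq_getElem _ _ (by simpa using h)]
  simp

theorem apply_fuzzed_data_spec : Claim_equal_apply_fuzzed_data := by
  intro initial_data fuzzed_nibbles bitmap _ hpre
  obtain ⟨heven, -, -⟩ := hpre
  obtain ⟨k, hk⟩ : ∃ k, bitmap.length = 2 * k := ⟨bitmap.length / 2, by omega⟩
  unfold Spec_apply_fuzzed_data apply_fuzzed_data apply_fuzzed_data_alt
  rw [hk, byteLoop, nibLoop, pyRange_two, List.map_map]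
  apply List.map_congr_left
  intro j hj
  have hj' : j < k := List.mem_range.mp hj
  have h1 : 2 * j < 2 * k := by omega
  have h2 : 2 * j + 1 < 2 * k := by omega
  have hcast : ((2 * j : Nat) : Int) + 1 = ((2 * j + 1 : Nat) : Int) := by push_cast; ring
  simp only [Function.comp, hcast, PySem.List.pyGetD_natCast]
  rw [getD_map_range_nib _ _ _ h1, getD_map_range_nib _ _ _ h2]
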